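-- pv_equiv track=rewrite | github.com/alexmqth/local_github | causal_reasoning_bak/verl-01-22/scripts/check_answer.py | _strip_tail
-- ===== SOURCE A (Python) =====
-- _TAIL_MARKERS = [
--     "I will prompt you with backward thinking",
--     "I will prompt you with backward",
-- ]
--
-- def _strip_tail(s: str) -> str:
--     if not isinstance(s, str):
--         s = str(s)
--     t = s
--     for m in _TAIL_MARKERS:
--         if m in t:
--             t = t.split(m, 1)[0]
--     return t.strip()
-- ===== SOURCE B (Python) =====
-- _TAIL_MARKERS = [
--     "I will prompt you with backward thinking",
--     "I will prompt you with backward",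
-- ]
--
-- def _strip_tail(s: str) -> str:
--     if not isinstance(s, str):
--         s = str(s)
--     # "I will prompt you with backward" is a prefix of every tail marker, so the
--     # earliest point any marker matches is the earliest match of this one string:
--     # scan positions left to right and cut at the first match.
--     m = "I will prompt you with backward"
--     for i in range(len(s)):
--         if s.startswith(m, i):
--             return s[:i].strip()
--     return s.strip()
-- ===== Notes on version B (the rewrite author's own statement) =====
-- stated objective: alternative
-- what changed: A loops over the marker list, repeatedly truncating with split(m,1)[0]; B notes that the short marker is a prefix of every marker, so it does a single left-to-right scan of character positions with startswith(m,i), returning s[:i].strip() at the first match (no per-marker loop, no repeated truncation; trades C-level split for an explicit position scan).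
import Mathlib
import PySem

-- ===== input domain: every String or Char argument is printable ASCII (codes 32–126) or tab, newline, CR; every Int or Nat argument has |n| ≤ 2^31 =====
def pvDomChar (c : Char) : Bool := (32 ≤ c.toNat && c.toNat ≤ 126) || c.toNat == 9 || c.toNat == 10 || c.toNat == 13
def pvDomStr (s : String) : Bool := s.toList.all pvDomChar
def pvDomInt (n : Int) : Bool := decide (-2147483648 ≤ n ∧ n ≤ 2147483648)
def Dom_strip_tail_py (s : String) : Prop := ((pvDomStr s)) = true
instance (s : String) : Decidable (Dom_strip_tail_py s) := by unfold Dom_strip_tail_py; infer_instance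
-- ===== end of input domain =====

-- B replaces A's per-marker split-and-reassign loop by one left-to-right scan of character
-- positions: the short marker is a prefix of every tail marker, so the cut point is the first
-- position where it matches (objective: simpler).

-- ===== PORT A =====
def pvTailMarkers : List String :=
  ["I will prompt you with backward thinking", "I will prompt you with backward"]

-- t.split(m, 1)[0]; the `none` branch is unreachable (each marker is non-empty)
def pvSplitHead (t m : String) : String :=
  match PySem.Str.splitMax? t m 1 with
  | some parts => (PySem.List.pyGet? parts 0).getD ""
  | none => t

def strip_tail_py (s : String) : String :=
  let t := pvTailMarkers.foldl (fun t m => if PySem.Str.isIn m t then pvSplitHead t m else t) s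
  PySem.Str.strip t

-- ===== PORT B =====
-- the loop 'for i in range(len(s)): if s.startswith(m, i): return s[:i].strip()' as structural
-- recursion on the suffix, carrying the position i; s.startswith(m, i) with 0 ≤ i < len(s) is
-- exactly PySem.Chars.startswith (s.toList.drop i) m.toList, i.e. startswith on the suffix.
def pvScanB (m : List Char) : List Char → Nat → Option Nat
  | [], _ => none
  | c :: rest, i =>
      if PySem.Chars.startswith (c :: rest) m then some i else pvScanB m rest (i + 1)

def strip_tail_py_alt (s : String) : String :=
  let m := "I will prompt you with backward"
  match pvScanB m.toList s.toList 0 with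
  | some i => PySem.Str.strip (PySem.Str.slice s none (some (i : Int)))
  | none => PySem.Str.strip s

-- ===== PRECONDITION & SPEC =====
def Spec_strip_tail_py (s : String) (out : String) : Prop := out = strip_tail_py_alt s
instance (s : String) (out : String) : Decidable (Spec_strip_tail_py s out) := by unfold Spec_strip_tail_py; infer_instance

-- ===== CLAIM (what is proved, stated in full; the proofs are below) =====
def Claim_equal_strip_tail_py : Prop := ∀ (s : String), Dom_strip_tail_py s → Spec_strip_tail_py s (strip_tail_py s)

-- ===== LEMMAS AND PROOFS =====

theorem pv_findgo_shift (sub : List Char) :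
    ∀ (l : List Char) (x : Nat), PySem.Chars.find.go sub l x =
      if PySem.Chars.find l sub = -1 then -1 else (x : Int) + PySem.Chars.find l sub := by
  intro l
  induction l with
  | nil =>
    intro x
    simp only [PySem.Chars.find, PySem.Chars.find.go.eq_1]
    by_cases h : sub.isEmpty <;> simp [h]
  | cons c t ih =>
    intro x
    simp only [PySem.Chars.find, PySem.Chars.find.go.eq_2]
    by_cases h : sub.isPrefixOf (c :: t) = true
    · simp [h]
    · simp only [h, if_neg, Bool.not_eq_true] at *
      rw [ih (x+1), ih 1]
      have hn := PySem.Chars.neg_one_le_find t sub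
      by_cases h2 : PySem.Chars.find t sub = -1 <;> simp [h2]
      omega

theorem pv_go0_head (sep : List Char) (fuel : Nat) (l cur : List Char) (a : List Char) :
    (PySem.Chars.splitOnMax.go sep fuel 0 l cur [a]).headD [] = a := by
  cases fuel <;> cases l <;> simp [PySem.Chars.splitOnMax.go]

theorem pv_go1_head (sep : List Char) (hsep : sep ≠ []) :
    ∀ (fuel : Nat) (l cur : List Char), l.length < fuel →
      (PySem.Chars.splitOnMax.go sep fuel 1 l cur []).headD [] =
        cur.reverse ++ (if PySem.Chars.find l sep = -1 then l
                        else l.take (PySem.Chars.find l sep).toNat) := by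
  intro fuel
  induction fuel with
  | zero => intro l cur h; omega
  | succ n ih =>
    intro l cur h
    cases l with
    | nil =>
      have : PySem.Chars.find [] sep = -1 := by
        simp [PySem.Chars.find, PySem.Chars.find.go.eq_1, List.isEmpty_iff, hsep]
      simp [PySem.Chars.splitOnMax.go, this]
    | cons c rest =>
      by_cases hp : sep.isPrefixOf (c :: rest) = true
      · have hfind : PySem.Chars.find (c :: rest) sep = 0 := by
          simp [PySem.Chars.find, PySem.Chars.find.go.eq_2, hp]
        simp only [PySem.Chars.splitOnMax.go, hp, if_true, hfind]
        simp only [if_neg (by norm_num : ¬(0:Int) = -1), Int.toNat_zero, List.take_zero,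
          List.append_nil]
        have h0 := pv_go0_head sep n (List.drop sep.length (c :: rest)) [] cur.reverse
        simpa using h0
      · have hstep : PySem.Chars.splitOnMax.go sep (n+1) 1 (c :: rest) cur [] =
            PySem.Chars.splitOnMax.go sep n 1 rest (c :: cur) [] := by
          simp [PySem.Chars.splitOnMax.go, hp]
        rw [hstep, ih rest (c :: cur) (by simpa using Nat.lt_of_succ_lt_succ h)]
        have hfind : PySem.Chars.find (c :: rest) sep =
            if PySem.Chars.find rest sep = -1 then -1 else 1 + PySem.Chars.find rest sep := by
          simp only [PySem.Chars.find, PySem.Chars.find.go.eq_2, hp, if_neg, Bool.not_eq_true]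
          rw [pv_findgo_shift]
          simp [PySem.Chars.find]
        have hn := PySem.Chars.neg_one_le_find rest sep
        by_cases h2 : PySem.Chars.find rest sep = -1
        · simp [hfind, h2]
        · have h3 : ¬ ((1 : Int) + PySem.Chars.find rest sep = -1) := by omega
          simp only [hfind, h2, if_neg h3, if_false]
          have h4 : ((1 : Int) + PySem.Chars.find rest sep).toNat =
              (PySem.Chars.find rest sep).toNat + 1 := by omega
          simp [h4, List.take_succ_cons]

theorem pv_splitOnMax_head (sep l : List Char) (hsep : sep ≠ []) :
    (PySem.Chars.splitOnMax l sep 1).headD [] =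
      if PySem.Chars.find l sep = -1 then l else l.take (PySem.Chars.find l sep).toNat := by
  have h := pv_go1_head sep hsep (l.length + 1) l [] (by omega)
  simpa [PySem.Chars.splitOnMax] using h

theorem pv_pvSplitHead_toList (t m : String) (hm : m.toList ≠ []) :
    (pvSplitHead t m).toList =
      if PySem.Chars.find t.toList m.toList = -1 then t.toList
      else t.toList.take (PySem.Chars.find t.toList m.toList).toNat := by
  have hmap := PySem.Str.splitMax?_map t m 1
  have hsome : PySem.Chars.splitMax? t.toList m.toList 1 =
      some (PySem.Chars.splitOnMax t.toList m.toList 1) := by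
    simp [PySem.Chars.splitMax?, List.isEmpty_iff, hm]
  rw [hsome] at hmap
  obtain ⟨parts, hparts, hmapeq⟩ := Option.map_eq_some_iff.mp hmap
  unfold pvSplitHead
  rw [hparts]
  have h0 : PySem.List.pyGet? parts 0 = parts.head? := by
    have := PySem.List.pyGet?_natCast parts 0
    simpa [← List.head?_eq_getElem?] using this
  simp only []
  rw [h0]
  have hhead := pv_splitOnMax_head m.toList t.toList hm
  rw [← hmapeq] at hhead
  rw [List.headD_eq_head?_getD, List.head?_map] at hhead
  rw [← hhead]
  cases parts.head? <;> simp

theorem pv_infix_of_prefix_drop {sub l : List Char} {i : Nat} (h : sub <+: l.drop i) :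
    sub <:+: l := by
  obtain ⟨r, hr⟩ := h
  exact ⟨l.take i, r, by rw [List.append_assoc, hr, List.take_append_drop]⟩

theorem pv_find_le_of_prefix_drop {sub l : List Char} {i : Nat} (h : sub <+: l.drop i) :
    PySem.Chars.find l sub ≤ (i : Int) := by
  have hnn : 0 ≤ PySem.Chars.find l sub :=
    (PySem.Chars.find_nonneg_iff l sub).mpr (pv_infix_of_prefix_drop h)
  by_contra hlt
  rw [not_le] at hlt
  have := (PySem.Chars.find_spec hnn).2 i (by omega)
  exact this h

theorem pv_find_eq_of {sub l : List Char} {j : Nat} (h1 : sub <+: l.drop j)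
    (h2 : ∀ i < j, ¬ sub <+: l.drop i) : PySem.Chars.find l sub = (j : Int) := by
  have hnn : 0 ≤ PySem.Chars.find l sub :=
    (PySem.Chars.find_nonneg_iff l sub).mpr (pv_infix_of_prefix_drop h1)
  have hle := pv_find_le_of_prefix_drop h1
  have hspec := PySem.Chars.find_spec hnn
  by_contra hne
  have hlt : (PySem.Chars.find l sub).toNat < j := by omega
  exact h2 _ hlt hspec.1

theorem pv_prefix_drop_of_take {sub l : List Char} {i n : Nat} (h : sub <+: (l.take n).drop i) :
    sub <+: l.drop i := by
  rw [List.drop_take] at h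
  exact h.trans (List.take_prefix _ _)

theorem pv_prefix_drop_take {sub l : List Char} {i n : Nat} (h : sub <+: l.drop i)
    (hn : i + sub.length ≤ n) : sub <+: (l.take n).drop i := by
  rw [List.drop_take]
  exact List.prefix_take_iff.mpr ⟨h, by omega⟩

theorem pv_m2_border_free : ∀ k : Nat, k < 31 → 0 < k →
    ("I will prompt you with backward").toList.drop k ≠
      ("I will prompt you with backward").toList.take (31 - k) := by decide

theorem pv_m2_no_overlap {l : List Char} {a b : Nat}
    (h1 : ("I will prompt you with backward").toList <+: l.drop a)
    (h2 : ("I will prompt you with backward").toList <+: l.drop b)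
    (hab : a < b) (hb : b < a + 31) : False := by
  set m2 := ("I will prompt you with backward").toList with hm2
  have hlen : m2.length = 31 := by decide
  obtain ⟨r, hr⟩ := h1
  have hdb : l.drop b = m2.drop (b - a) ++ r := by
    have : l.drop b = (l.drop a).drop (b - a) := by rw [List.drop_drop]; congr 1; omega
    rw [this, ← hr, List.drop_append_of_le_length (by omega)]
  rw [hdb] at h2
  obtain ⟨t, ht⟩ := h2
  have hkey : m2.take (31 - (b - a)) = m2.drop (b - a) := by
    have htake := congrArg (List.take (31 - (b - a))) ht
    rw [List.take_append_of_le_length (by simp [hlen]),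
        List.take_append_of_le_length (by simp [hlen]),
        List.take_of_length_le (l := m2.drop (b - a)) (by simp [hlen])] at htake
    exact htake
  exact pv_m2_border_free (b - a) (by omega) (by omega) hkey.symm

-- A's value at the character level: cut at the first occurrence of the short marker
theorem pv_A_char (s : String) :
    (strip_tail_py s).toList = PySem.Chars.strip
      (if PySem.Chars.find s.toList ("I will prompt you with backward").toList = -1
       then s.toList
       else s.toList.take (PySem.Chars.find s.toList
              ("I will prompt you with backward").toList).toNat) := by
  simp only [strip_tail_py, pvTailMarkers, List.foldl_cons, List.foldl_nil,
    PySem.Str.toList_strip]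
  refine congrArg PySem.Chars.strip ?_
  have hm1ne : ("I will prompt you with backward thinking" : String).toList ≠ [] := by decide
  have hm2ne : ("I will prompt you with backward" : String).toList ≠ [] := by decide
  have hpre : ("I will prompt you with backward" : String).toList <+:
      ("I will prompt you with backward thinking" : String).toList := by decide
  have hlen2 : ("I will prompt you with backward" : String).toList.length = 31 := by decide
  set l := s.toList with hl
  set lm1 := ("I will prompt you with backward thinking" : String).toList with hlm1
  set lm2 := ("I will prompt you with backward" : String).toList with hlm2
  have hneg1 := PySem.Chars.neg_one_le_find l lm1
  have hneg2 := PySem.Chars.neg_one_le_find l lm2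
  by_cases hf1 : PySem.Chars.find l lm1 = -1
  · -- m1 absent
    have hin1 : PySem.Str.isIn "I will prompt you with backward thinking" s = false := by
      rw [PySem.Str.isIn_eq]
      exact (PySem.Chars.isIn_eq_false_iff _ _).mpr
        ((PySem.Chars.find_eq_neg_one_iff l lm1).mp hf1)
    by_cases hf2 : PySem.Chars.find l lm2 = -1
    · have hin2 : PySem.Str.isIn "I will prompt you with backward" s = false := by
        rw [PySem.Str.isIn_eq]
        exact (PySem.Chars.isIn_eq_false_iff _ _).mpr
          ((PySem.Chars.find_eq_neg_one_iff l lm2).mp hf2)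
      simp only [hin1, hin2, if_false, Bool.false_eq_true, hf2, if_pos]
      exact hl.symm
    · -- only m2 present
      have hf2nn : 0 ≤ PySem.Chars.find l lm2 := by omega
      have hin2 : PySem.Str.isIn "I will prompt you with backward" s = true := by
        rw [PySem.Str.isIn_eq, PySem.Chars.isIn_iff_infix]
        exact (PySem.Chars.find_nonneg_iff l lm2).mp hf2nn
      simp only [hin1, hin2, if_false, if_true, Bool.false_eq_true]
      rw [pv_pvSplitHead_toList s _ hm2ne]
  · -- m1 present
    have hf1nn : 0 ≤ PySem.Chars.find l lm1 := by omega
    have hin1 : PySem.Str.isIn "I will prompt you with backward thinking" s = true := by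
      rw [PySem.Str.isIn_eq, PySem.Chars.isIn_iff_infix]
      exact (PySem.Chars.find_nonneg_iff l lm1).mp hf1nn
    have hocc1 : lm1 <+: l.drop (PySem.Chars.find l lm1).toNat := (PySem.Chars.find_spec hf1nn).1
    have hocc2 : lm2 <+: l.drop (PySem.Chars.find l lm1).toNat := hpre.trans hocc1
    have hf2nn : 0 ≤ PySem.Chars.find l lm2 :=
      (PySem.Chars.find_nonneg_iff l lm2).mpr (pv_infix_of_prefix_drop hocc2)
    have hf2le : PySem.Chars.find l lm2 ≤ PySem.Chars.find l lm1 := by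
      have := pv_find_le_of_prefix_drop hocc2
      omega
    set f1 := PySem.Chars.find l lm1 with hF1
    set f2 := PySem.Chars.find l lm2 with hF2
    have hocc2' : lm2 <+: l.drop f2.toNat := (PySem.Chars.find_spec hf2nn).1
    have hfirst2 := (PySem.Chars.find_spec hf2nn).2
    simp only [hin1, if_true]
    conv_rhs => rw [if_neg (show ¬ f2 = -1 by omega)]
    have ht1 : (pvSplitHead s "I will prompt you with backward thinking").toList =
        l.take f1.toNat := by
      rw [pv_pvSplitHead_toList s _ hm1ne, ← hlm1, ← hl, ← hF1, if_neg (by omega)]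
    by_cases hin : lm2 <:+: l.take f1.toNat
    · -- marker 2 occurs inside the truncated string
      have hin2 : PySem.Str.isIn "I will prompt you with backward"
          (pvSplitHead s "I will prompt you with backward thinking") = true := by
        rw [PySem.Str.isIn_eq, PySem.Chars.isIn_iff_infix, ht1]
        exact hin
      simp only [hin2, if_true]
      obtain ⟨j, hj⟩ : ∃ j, lm2 <+: (l.take f1.toNat).drop j := by
        rw [PySem.Chars.exists_prefix_drop_iff_isIn, PySem.Chars.isIn_iff_infix]
        exact hin
      have hjl : lm2 <+: l.drop j := pv_prefix_drop_of_take hj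
      have hf2j : f2 ≤ (j : Int) := pv_find_le_of_prefix_drop hjl
      have hjlen : j + 31 ≤ f1.toNat := by
        have h1 := hj.length_le
        rw [List.length_drop, List.length_take] at h1
        rw [hlen2] at h1
        omega
      have hroom : f2.toNat + lm2.length ≤ f1.toNat := by rw [hlen2]; omega
      have hfeq : PySem.Chars.find (l.take f1.toNat) lm2 = (f2.toNat : Int) := by
        apply pv_find_eq_of
        · exact pv_prefix_drop_take hocc2' hroom
        · intro i hi hcon
          exact hfirst2 i hi (pv_prefix_drop_of_take hcon)
      rw [pv_pvSplitHead_toList _ _ hm2ne, ← hlm2, ht1, hfeq]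
      rw [if_neg (by omega)]
      rw [List.take_take, Int.toNat_natCast]
      congr 1
      omega
    · -- marker 2 does not occur in the truncated string: then f2 = f1
      have hin2 : PySem.Str.isIn "I will prompt you with backward"
          (pvSplitHead s "I will prompt you with backward thinking") = false := by
        rw [PySem.Str.isIn_eq, ht1]
        exact (PySem.Chars.isIn_eq_false_iff _ _).mpr hin
      simp only [hin2, if_false, Bool.false_eq_true]
      rw [ht1]
      have hfeq : f1 = f2 := by
        by_contra hne
        have hlt : f2 < f1 := by omega
        by_cases hroom : f2.toNat + 31 ≤ f1.toNat
        · exact hin (pv_infix_of_prefix_drop (l := l.take f1.toNat) (i := f2.toNat)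
            (pv_prefix_drop_take hocc2' (by rw [hlen2]; omega)))
        · exact pv_m2_no_overlap (hlm2 ▸ hocc2') (hlm2 ▸ hocc2) (by omega) (by omega)
      rw [hfeq]

-- pvScanB computes find.go (for a non-empty pattern)
theorem pv_scan_eq_findgo (m : List Char) (hm : m ≠ []) :
    ∀ (l : List Char) (i : Nat), pvScanB m l i =
      if PySem.Chars.find.go m l i = -1 then none
      else some (PySem.Chars.find.go m l i).toNat := by
  intro l
  induction l with
  | nil =>
    intro i
    simp [pvScanB, PySem.Chars.find.go.eq_1, List.isEmpty_iff, hm]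
  | cons c t ih =>
    intro i
    simp only [pvScanB, PySem.Chars.find.go.eq_2]
    by_cases hp : m <+: (c :: t)
    · have hsw : PySem.Chars.startswith (c :: t) m = true :=
        (PySem.Chars.startswith_iff _ _).mpr hp
      have hip : m.isPrefixOf (c :: t) = true := List.isPrefixOf_iff_prefix.mpr hp
      rw [hsw, if_pos rfl, hip, if_pos rfl]
      rw [if_neg (by omega)]
      simp
    · have hsw : PySem.Chars.startswith (c :: t) m = false := by
        rw [← Bool.not_eq_true, PySem.Chars.startswith_iff]; exact hp
      have hip : m.isPrefixOf (c :: t) = false := by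
        rw [← Bool.not_eq_true, List.isPrefixOf_iff_prefix]; exact hp
      simp only [hsw, hip, Bool.false_eq_true, if_false]
      exact ih (i + 1)

-- B's value at the character level
theorem pv_B_char (s : String) :
    (strip_tail_py_alt s).toList = PySem.Chars.strip
      (if PySem.Chars.find s.toList ("I will prompt you with backward").toList = -1
       then s.toList
       else s.toList.take (PySem.Chars.find s.toList
              ("I will prompt you with backward").toList).toNat) := by
  have hm2ne : ("I will prompt you with backward" : String).toList ≠ [] := by decide
  have hneg := PySem.Chars.neg_one_le_find s.toList
    ("I will prompt you with backward" : String).toList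
  have hgo : PySem.Chars.find.go ("I will prompt you with backward" : String).toList s.toList 0
      = PySem.Chars.find s.toList ("I will prompt you with backward" : String).toList := rfl
  simp only [strip_tail_py_alt]
  rw [pv_scan_eq_findgo _ hm2ne s.toList 0, hgo]
  by_cases hf : PySem.Chars.find s.toList ("I will prompt you with backward" : String).toList = -1
  · rw [if_pos hf, if_pos hf]
    exact PySem.Str.toList_strip s
  · rw [if_neg hf]
    rw [PySem.Str.toList_strip, PySem.Str.toList_slice, PySem.Chars.slice_eq_listSlice,
        PySem.List.slice_to _ (Int.natCast_nonneg _)]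
    rw [Int.toNat_natCast, if_neg hf]

-- ===== VERDICT (by name: the statement is the Claim_ definition above) =====
theorem strip_tail_py_spec : Claim_equal_strip_tail_py := by
  intro s _
  show strip_tail_py s = strip_tail_py_alt s
  exact String.toList_inj.mp ((pv_A_char s).trans (pv_B_char s).symm)
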